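-- pv_equiv track=rewrite | github.com/MrBrantCode/unitest_baseline | mut_generate/mist_train_cf/cf_86344/solution.py | calculate_discounted_prices
-- ===== SOURCE A (Python) =====
-- def calculate_discounted_prices(lst, threshold):
--     total_discounted_price = 0
--     num_discounted_items_above_threshold = 0
--
--     for item in lst:
--         price = item["price"]
--         discount = item["discount"]
--
--         discounted_price = price - discount
--         total_discounted_price += discounted_price
--
--         if discounted_price > threshold:
--             num_discounted_items_above_threshold += 1
--
--     return total_discounted_price, num_discounted_items_above_threshold
-- ===== SOURCE B (Python) =====
-- def calculate_discounted_prices(lst, threshold):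
--     # Divide and conquer: split the list in halves, solve each half recursively,
--     # combine the (sum, count) pairs; the combine step is associative-additive.
--     def solve(items):
--         if not items:
--             return (0, 0)
--         if len(items) == 1:
--             d = items[0]["price"] - items[0]["discount"]
--             return (d, 1 if d > threshold else 0)
--         mid = len(items) // 2
--         ls, lc = solve(items[:mid])
--         rs, rc = solve(items[mid:])
--         return (ls + rs, lc + rc)
--     return solve(lst)
-- ===== Notes on version B (the rewrite author's own statement) =====
-- stated objective: alternative
-- what changed: Replaces A's single left-to-right fold with two accumulators by a divide-and-conquer recursion: the list is split in halves, each half solved recursively to a (sum, count) pair, and the pairs are combined componentwise.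
import Mathlib
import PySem

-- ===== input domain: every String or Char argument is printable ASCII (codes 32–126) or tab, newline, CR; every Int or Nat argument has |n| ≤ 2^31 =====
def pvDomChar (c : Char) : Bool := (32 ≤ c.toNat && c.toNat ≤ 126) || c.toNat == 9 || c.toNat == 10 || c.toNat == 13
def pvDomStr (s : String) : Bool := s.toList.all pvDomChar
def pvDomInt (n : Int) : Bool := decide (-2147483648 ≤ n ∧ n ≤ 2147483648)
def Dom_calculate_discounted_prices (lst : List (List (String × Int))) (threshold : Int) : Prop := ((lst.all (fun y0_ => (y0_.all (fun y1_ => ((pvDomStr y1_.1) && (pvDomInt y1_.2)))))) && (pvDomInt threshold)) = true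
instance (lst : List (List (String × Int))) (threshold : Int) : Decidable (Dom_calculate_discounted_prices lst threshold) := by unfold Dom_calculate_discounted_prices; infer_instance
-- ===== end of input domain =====

-- B replaces A's single left-to-right fold with two accumulators by a divide-and-conquer
-- recursion combining (sum, count) pairs of the two halves; alternative structure, same result.

-- ===== PORT A =====
def calculate_discounted_prices (lst : List (List (String × Int))) (threshold : Int) : Int × Int :=
  lst.foldl (fun (st : Int × Int) item =>
    -- item["price"] / item["discount"]: Pre_ guarantees the keys are present
    -- (Python raises KeyError otherwise), so .getD 0 is exact on Pre_
    let price := ((PySem.Dict.mk item).get? "price").getD 0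
    let discount := ((PySem.Dict.mk item).get? "discount").getD 0
    let discounted_price := price - discount
    (st.1 + discounted_price,
     if discounted_price > threshold then st.2 + 1 else st.2)) (0, 0)

-- ===== PORT B =====
-- the inner recursive helper `solve` of Source B (divide and conquer over list halves)
def cdp_solve (threshold : Int) : List (List (String × Int)) → Int × Int
  | [] => (0, 0)
  | [item] =>
      let d := ((PySem.Dict.mk item).get? "price").getD 0
               - ((PySem.Dict.mk item).get? "discount").getD 0
      (d, if d > threshold then 1 else 0)
  | x :: y :: rest =>
      let items := x :: y :: rest
      let mid := items.length / 2
      let lres := cdp_solve threshold (items.take mid)   -- items[:mid]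
      let rres := cdp_solve threshold (items.drop mid)   -- items[mid:]
      (lres.1 + rres.1, lres.2 + rres.2)
  termination_by xs => xs.length
  decreasing_by
  · simp only [List.length_take, List.length_cons]
    omega
  · simp only [List.length_drop, List.length_cons]
    omega

def calculate_discounted_prices_alt (lst : List (List (String × Int))) (threshold : Int) : Int × Int :=
  cdp_solve threshold lst

-- ===== PRECONDITION & SPEC =====
-- Pre_ excludes exactly the items missing a "price" or "discount" key, on which A raises KeyError.
def Pre_calculate_discounted_prices (lst : List (List (String × Int))) (threshold : Int) : Prop :=
  ∀ item ∈ lst, (PySem.Dict.mk item).contains "price" ∧ (PySem.Dict.mk item).contains "discount"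
instance (lst : List (List (String × Int))) (threshold : Int) : Decidable (Pre_calculate_discounted_prices lst threshold) := by unfold Pre_calculate_discounted_prices; infer_instance
def pvWitness_calculate_discounted_prices : (List (List (String × Int))) × Int :=
  ([[("price", 10), ("discount", 3)], [("price", 5), ("discount", 0)]], 4)

def Spec_calculate_discounted_prices (lst : List (List (String × Int))) (threshold : Int) (out : Int × Int) : Prop := out = calculate_discounted_prices_alt lst threshold
instance (lst : List (List (String × Int))) (threshold : Int) (out : Int × Int) : Decidable (Spec_calculate_discounted_prices lst threshold out) := by unfold Spec_calculate_discounted_prices; infer_instance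

-- ===== CLAIM (what is proved, stated in full; the proofs are below) =====
def Claim_equal_calculate_discounted_prices : Prop := ∀ (lst : List (List (String × Int))) (threshold : Int), Dom_calculate_discounted_prices lst threshold → Pre_calculate_discounted_prices lst threshold → Spec_calculate_discounted_prices lst threshold (calculate_discounted_prices lst threshold)

-- ===== LEMMAS AND PROOFS =====
-- the discounted price of one item
def cdpDisc (item : List (String × Int)) : Int :=
  ((PySem.Dict.mk item).get? "price").getD 0 - ((PySem.Dict.mk item).get? "discount").getD 0

-- reference value: (sum of discounted prices, count above threshold)
def cdpRef (threshold : Int) (xs : List (List (String × Int))) : Int × Int :=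
  ((xs.map cdpDisc).sum, (xs.countP (fun it => cdpDisc it > threshold) : Int))

lemma cdpRef_append (threshold : Int) (xs ys : List (List (String × Int))) :
    cdpRef threshold (xs ++ ys)
      = ((cdpRef threshold xs).1 + (cdpRef threshold ys).1,
         (cdpRef threshold xs).2 + (cdpRef threshold ys).2) := by
  simp [cdpRef, List.countP_append]

lemma cdp_solve_eq_ref_aux (threshold : Int) :
    ∀ (n : Nat) (xs : List (List (String × Int))), xs.length ≤ n →
      cdp_solve threshold xs = cdpRef threshold xs := by
  intro n
  induction n with
  | zero =>
      intro xs h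
      have : xs = [] := List.eq_nil_of_length_eq_zero (Nat.le_zero.mp h)
      subst this
      simp [cdp_solve, cdpRef]
  | succ n ih =>
      intro xs h
      match xs with
      | [] => simp [cdp_solve, cdpRef]
      | [item] =>
          simp only [cdp_solve, cdpRef, cdpDisc, List.map_cons, List.map_nil, List.sum_cons,
            List.sum_nil, List.countP_cons, List.countP_nil, add_zero, zero_add]
          split_ifs <;> simp_all <;> omega
      | x :: y :: rest =>
          rw [cdp_solve]
          have hlen : (x :: y :: rest).length = rest.length + 2 := by simp
          have h1 : ((x :: y :: rest).take ((x :: y :: rest).length / 2)).length ≤ n := by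
            simp only [List.length_take, hlen] at *
            omega
          have h2 : ((x :: y :: rest).drop ((x :: y :: rest).length / 2)).length ≤ n := by
            simp only [List.length_drop, hlen] at *
            omega
          rw [ih _ h1, ih _ h2]
          conv_rhs => rw [show (x :: y :: rest) =
            (x :: y :: rest).take ((x :: y :: rest).length / 2)
              ++ (x :: y :: rest).drop ((x :: y :: rest).length / 2) by simp]
          rw [cdpRef_append]

lemma cdp_solve_eq_ref (threshold : Int) (xs : List (List (String × Int))) :
    cdp_solve threshold xs = cdpRef threshold xs :=
  cdp_solve_eq_ref_aux threshold xs.length xs le_rfl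

lemma cdp_fold_eq_ref (threshold : Int) (xs : List (List (String × Int))) (a b : Int) :
    xs.foldl (fun (st : Int × Int) item =>
      let price := ((PySem.Dict.mk item).get? "price").getD 0
      let discount := ((PySem.Dict.mk item).get? "discount").getD 0
      let discounted_price := price - discount
      (st.1 + discounted_price,
       if discounted_price > threshold then st.2 + 1 else st.2)) (a, b)
    = (a + (cdpRef threshold xs).1, b + (cdpRef threshold xs).2) := by
  induction xs generalizing a b with
  | nil => simp [cdpRef]
  | cons hd tl ih =>
      simp only [List.foldl_cons, ih]
      simp only [cdpRef, List.map_cons, List.sum_cons, List.countP_cons, cdpDisc]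
      by_cases h : (((PySem.Dict.mk hd).get? "price").getD 0
          - ((PySem.Dict.mk hd).get? "discount").getD 0) > threshold
      · simp only [h, if_pos, decide_true, Prod.mk.injEq]
        constructor <;> push_cast <;> ring
      · simp only [h, if_neg, not_false_eq_true, decide_false, Prod.mk.injEq]
        constructor
        · ring
        · simp

-- ===== VERDICT (by name: the statement is the Claim_ definition above) =====
theorem calculate_discounted_prices_spec : Claim_equal_calculate_discounted_prices := by
  intro lst threshold _ _
  unfold Spec_calculate_discounted_prices calculate_discounted_prices calculate_discounted_prices_alt
  rw [cdp_fold_eq_ref, cdp_solve_eq_ref]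
  simp
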